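-- pv_equiv track=rewrite | github.com/tomhoover/addons-source | contrib/Query/QueryQuickview.py | groupings
-- ===== SOURCE A (Python) =====
-- def groupings(string):
--     groups = []
--     current_type = None
--     for c in string:
--         if (not c.isdigit()) and current_type == "alpha":
--             groups[-1].append(c)
--         elif c.isdigit() and current_type == "numeric":
--             groups[-1].append(c)
--         else:
--             if c.isdigit():
--                 current_type = "numeric"
--             else:
--                 current_type = "alpha"
--             groups.append([c])
--     retval = []
--     for group in groups:
--         if group[0].isdigit():
--             retval.append("".join(group).zfill(10))
--         else:
--             retval.append("".join(group).zfill(5))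
--     return (retval)
-- ===== SOURCE B (Python) =====
-- def groupings(string):
--     retval = []
--     i = 0
--     n = len(string)
--     while i < n:
--         d = string[i].isdigit()
--         j = i + 1
--         while j < n and string[j].isdigit() == d:
--             j += 1
--         retval.append(string[i:j].zfill(10 if d else 5))
--         i = j
--     return retval
-- ===== Notes on version B (the rewrite author's own statement) =====
-- stated objective: simpler
-- what changed: Replaced the current_type state machine building a list of char-lists plus a second formatting pass by a single two-pointer scan that slices each maximal same-class run and zero-pads it immediately.
import Mathlib
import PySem

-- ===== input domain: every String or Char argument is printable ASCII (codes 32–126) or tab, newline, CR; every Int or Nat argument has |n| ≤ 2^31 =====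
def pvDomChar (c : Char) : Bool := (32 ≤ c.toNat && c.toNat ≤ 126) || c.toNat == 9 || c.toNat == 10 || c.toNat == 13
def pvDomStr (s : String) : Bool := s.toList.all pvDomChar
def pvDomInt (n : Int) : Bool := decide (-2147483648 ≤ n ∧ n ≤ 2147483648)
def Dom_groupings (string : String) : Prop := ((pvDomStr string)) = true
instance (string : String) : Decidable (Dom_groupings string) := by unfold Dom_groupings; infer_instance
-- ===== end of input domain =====

-- B replaces A's current_type state machine (list of char-lists + second formatting pass)
-- by a single two-pointer scan that pads each maximal same-class run immediately; simpler.


-- ===== PORT A =====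
-- groups[-1].append(c): modify the last group in place
def pvAppendLast : List (List Char) → Char → List (List Char)
  | [], _ => []            -- unreachable: Python would raise IndexError, the loop never hits it
  | [g], c => [g ++ [c]]
  | g :: gs, c => g :: pvAppendLast gs c

-- one iteration of A's first loop; current_type is the Python string "alpha"/"numeric"
def pvStepA (st : List (List Char) × Option String) (c : Char) : List (List Char) × Option String :=
  if (!PySem.Chars.isdigit c) && st.2 == some "alpha" then (pvAppendLast st.1 c, st.2)
  else if PySem.Chars.isdigit c && st.2 == some "numeric" then (pvAppendLast st.1 c, st.2)
  else if PySem.Chars.isdigit c then (st.1 ++ [[c]], some "numeric")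
  else (st.1 ++ [[c]], some "alpha")

-- body of A's second loop; "".join(group) of one-char strings is String.mk group (exact)
def pvFmtA (g : List Char) : String :=
  match g with
  | [] => ""               -- unreachable: group[0] on an empty group would raise in Python
  | c :: _ => if PySem.Chars.isdigit c then PySem.Str.zfill (String.mk g) 10
              else PySem.Str.zfill (String.mk g) 5

def groupings (string : String) : List String :=
  let groups := (string.toList.foldl pvStepA ([], none)).1
  groups.foldl (fun r g => r ++ [pvFmtA g]) []

-- ===== PORT B =====
-- inner while: collect the run of chars whose isdigit equals d, return (run, rest)
def pvRun (d : Bool) : List Char → List Char × List Char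
  | [] => ([], [])
  | c :: cs => if PySem.Chars.isdigit c == d then (c :: (pvRun d cs).1, (pvRun d cs).2)
               else ([], c :: cs)

theorem pvRun_snd_le (d : Bool) (cs : List Char) : (pvRun d cs).2.length ≤ cs.length := by
  induction cs with
  | nil => simp [pvRun]
  | cons c cs ih => simp only [pvRun]; split <;> simp <;> omega

-- outer while: emit one padded run per iteration
def pvBLoop : List Char → List String
  | [] => []
  | c :: cs =>
      let d := PySem.Chars.isdigit c
      PySem.Str.zfill (String.mk (c :: (pvRun d cs).1)) (if d then 10 else 5) :: pvBLoop (pvRun d cs).2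
termination_by cs => cs.length
decreasing_by exact Nat.lt_succ_of_le (pvRun_snd_le _ _)

def groupings_alt (string : String) : List String := pvBLoop string.toList

-- ===== PRECONDITION & SPEC =====
def Spec_groupings (string : String) (out : List String) : Prop := out = groupings_alt string
instance (string : String) (out : List String) : Decidable (Spec_groupings string out) := by unfold Spec_groupings; infer_instance

-- ===== CLAIM (what is proved, stated in full; the proofs are below) =====
def Claim_equal_groupings : Prop := ∀ (string : String), Dom_groupings string → Spec_groupings string (groupings string)

-- ===== LEMMAS AND PROOFS =====
-- canonical maximal-run splitting, used only by the proofs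
def pvRuns : List Char → List (List Char)
  | [] => []
  | c :: cs =>
      (c :: cs.takeWhile (fun x => PySem.Chars.isdigit x == PySem.Chars.isdigit c)) ::
      pvRuns (cs.dropWhile (fun x => PySem.Chars.isdigit x == PySem.Chars.isdigit c))
termination_by cs => cs.length
decreasing_by exact Nat.lt_succ_of_le (List.length_dropWhile_le _ _)

theorem pvRun_eq (d : Bool) (cs : List Char) :
    pvRun d cs = (cs.takeWhile (fun x => PySem.Chars.isdigit x == d),
                  cs.dropWhile (fun x => PySem.Chars.isdigit x == d)) := by
  induction cs with
  | nil => simp [pvRun]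
  | cons c cs ih =>
      by_cases h : PySem.Chars.isdigit c = d
      · simp [pvRun, List.takeWhile_cons, List.dropWhile_cons, h, ih]
      · simp [pvRun, h]

theorem pvBLoop_eq (cs : List Char) : pvBLoop cs = (pvRuns cs).map pvFmtA := by
  induction hn : cs.length using Nat.strong_induction_on generalizing cs with
  | _ n ih =>
    cases cs with
    | nil => simp [pvBLoop, pvRuns]
    | cons c cs =>
        rw [pvBLoop, pvRuns, pvRun_eq]
        simp only [List.map_cons]
        congr 1
        · by_cases h : PySem.Chars.isdigit c = true <;> simp [pvFmtA, h]
        · exact ih _ (by subst hn; exact Nat.lt_succ_of_le (List.length_dropWhile_le _ _)) _ rfl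

def pvTstr (d : Bool) : String := if d then "numeric" else "alpha"

def pvFtyp (d : Bool) (cs : List Char) : Bool :=
  (cs.getLast?.map PySem.Chars.isdigit).getD d

theorem pvAppendLast_append (gs : List (List Char)) (g : List Char) (c : Char) :
    pvAppendLast (gs ++ [g]) c = gs ++ [g ++ [c]] := by
  induction gs with
  | nil => rfl
  | cons a gs ih =>
      cases gs with
      | nil => simp [pvAppendLast]
      | cons b gs => simpa [pvAppendLast] using ih

theorem pvFtyp_cons (d : Bool) (c : Char) (cs : List Char) :
    pvFtyp d (c :: cs) = pvFtyp (PySem.Chars.isdigit c) cs := by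
  cases cs with
  | nil => simp [pvFtyp]
  | cons b bs =>
      rw [pvFtyp, pvFtyp, List.getLast?_cons_cons,
          List.getLast?_eq_some_getLast (l := b :: bs) (by simp)]
      simp

theorem pvStepA_main (cs : List Char) (gs : List (List Char)) (g : List Char) (d : Bool) :
    cs.foldl pvStepA (gs ++ [g], some (pvTstr d)) =
      (gs ++ (g ++ cs.takeWhile (fun x => PySem.Chars.isdigit x == d)) ::
        pvRuns (cs.dropWhile (fun x => PySem.Chars.isdigit x == d)),
       some (pvTstr (pvFtyp d cs))) := by
  induction cs generalizing gs g d with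
  | nil => simp [pvRuns, pvFtyp]
  | cons c cs ih =>
      by_cases h : PySem.Chars.isdigit c = d
      · have hstep : pvStepA (gs ++ [g], some (pvTstr d)) c
            = (gs ++ [g ++ [c]], some (pvTstr d)) := by
          cases d <;> simp_all [pvStepA, pvTstr, pvAppendLast_append]
        rw [List.foldl_cons, hstep, ih]
        rw [pvFtyp_cons, h]
        simp [h]
      · have hstep : pvStepA (gs ++ [g], some (pvTstr d)) c
            = ((gs ++ [g]) ++ [[c]], some (pvTstr (PySem.Chars.isdigit c))) := by
          cases d <;> cases hc : PySem.Chars.isdigit c <;>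
            simp_all [pvStepA, pvTstr]
        rw [List.foldl_cons, hstep, ih]
        rw [pvFtyp_cons]
        have ht : List.takeWhile (fun x => PySem.Chars.isdigit x == d) (c :: cs) = [] := by
          simp [h]
        have hd : List.dropWhile (fun x => PySem.Chars.isdigit x == d) (c :: cs) = c :: cs := by
          simp [h]
        rw [ht, hd, pvRuns]
        simp

theorem groupings_eq (s : String) : groupings s = (pvRuns s.toList).map pvFmtA := by
  unfold groupings
  rw [PySem.List.foldl_append_singleton_eq_map]
  cases hcs : s.toList with
  | nil => simp [pvRuns]
  | cons c cs =>
      have h0 : pvStepA ([], none) c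
          = (([] : List (List Char)) ++ [[c]], some (pvTstr (PySem.Chars.isdigit c))) := by
        cases hc : PySem.Chars.isdigit c <;> simp [pvStepA, pvTstr, hc]
      rw [List.foldl_cons, h0, pvStepA_main, pvRuns]
      simp

-- ===== VERDICT (by name: the statement is the Claim_ definition above) =====
theorem groupings_spec : Claim_equal_groupings := by
  intro s _
  unfold Spec_groupings groupings_alt
  rw [groupings_eq, pvBLoop_eq]
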